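-- pv_equiv track=rewrite | github.com/lilylogan/CS210-project-6-7 | 06-Boggle-main/boggler.py | search
-- ===== SOURCE A (Python) =====
-- NOPE = "Nope"
--
-- MATCH = "Match"
--
-- PREFIX = "Prefix"
--
-- def search(candidate: str, word_list: list[str]) -> str:
--     """Determine whther candidate is a MATCH, a PREFIX of a match, or a big
--     NOPE. Note word list MUST be in sorted order.
--     >>> search("ALPHA", ['ALPHA', 'BETA', 'GAMMA']) == MATCH
--     True
--
--     >>> search("BE", ['ALPHA', 'BETA', 'GAMMA']) == PREFIX
--     True
--
--     >>> search("FOX", ['ALPHA', 'BETA', 'GAMMA']) == NOPE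
--     True
--
--     >>> search("ZZZZ", ['ALPHA', 'BETA', 'GAMMA']) == NOPE
--     True
--     """
--     low = 0
--     high = len(word_list)-1
--     while low <= high:
--         mid = (low + high)//2
--         if word_list[mid] == candidate:
--             return MATCH
--         elif word_list[mid] < candidate: #mid is before candidate
--             low = mid+1
--         elif word_list[mid] > candidate: #mid is after candidate
--             high = mid-1
--     if low < len(word_list) and word_list[low].startswith(candidate):
--         return PREFIX
--     return NOPE
-- ===== SOURCE B (Python) =====
-- NOPE = "Nope"
-- MATCH = "Match"
-- PREFIX = "Prefix"
--
-- def search(candidate: str, word_list: list[str]) -> str: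
--     """Linear one-pass classification: exact membership first, then prefix test."""
--     if candidate in word_list:
--         return MATCH
--     if any(w.startswith(candidate) for w in word_list):
--         return PREFIX
--     return NOPE
-- ===== Notes on version B (the rewrite author's own statement) =====
-- stated objective: simpler
-- what changed: Replaced the hand-written binary search over (low, high) with a single linear scan: exact membership first, then an any-startswith pass; equal on every sorted word list, which A's docstring requires.
-- outside the precondition, e.g. on search('A', ['B', 'A']): A returns 'Nope', B returns 'Match'
import Mathlib
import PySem

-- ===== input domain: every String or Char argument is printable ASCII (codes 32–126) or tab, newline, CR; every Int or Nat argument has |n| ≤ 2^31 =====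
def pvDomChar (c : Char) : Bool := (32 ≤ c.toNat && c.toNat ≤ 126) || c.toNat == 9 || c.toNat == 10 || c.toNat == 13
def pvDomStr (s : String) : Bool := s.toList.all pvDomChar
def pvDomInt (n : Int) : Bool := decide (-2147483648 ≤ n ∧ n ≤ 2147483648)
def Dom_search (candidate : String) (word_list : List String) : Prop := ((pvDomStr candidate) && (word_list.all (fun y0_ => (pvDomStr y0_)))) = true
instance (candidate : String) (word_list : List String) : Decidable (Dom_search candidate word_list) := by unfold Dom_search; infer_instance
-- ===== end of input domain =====

-- B replaces A's hand-written binary search by a single linear membership/any-prefix scan: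
-- simpler and correct on every sorted word list (A's documented precondition).

-- ===== PORT A =====
def pvNOPE : String := "Nope"
def pvMATCH : String := "Match"
def pvPREFIX : String := "Prefix"

-- A's while-loop, with (low, high) as the loop state; word_list[mid] via pyGetD
-- (mid is provably in range on every state the loop reaches, so the default is never read)
def searchLoop (candidate : String) (word_list : List String) (low high : Int) : String :=
  if h : low ≤ high then
    let mid := PySem.Int.floordiv (low + high) 2
    let w := PySem.List.pyGetD word_list mid ""
    if w = candidate then pvMATCH
    else if w < candidate then searchLoop candidate word_list (mid + 1) high
    else searchLoop candidate word_list low (mid - 1)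
  else
    if low < (word_list.length : Int) ∧
        PySem.Str.startswith (PySem.List.pyGetD word_list low "") candidate = true then pvPREFIX
    else pvNOPE
termination_by (high + 1 - low).toNat
decreasing_by
  · have := PySem.Int.floordiv_two_mid_bounds h; omega
  · have := PySem.Int.floordiv_two_mid_bounds h; omega

def search (candidate : String) (word_list : List String) : String :=
  searchLoop candidate word_list 0 ((word_list.length : Int) - 1)

-- ===== PORT B =====
def search_alt (candidate : String) (word_list : List String) : String :=
  if word_list.contains candidate then pvMATCH
  else if word_list.any (fun w => PySem.Str.startswith w candidate) then pvPREFIX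
  else pvNOPE

-- ===== PRECONDITION & SPEC =====
-- Pre_ excludes unsorted word lists: A's docstring says the list MUST be sorted, and on
-- unsorted lists the binary search's answer is accidental (it can miss present words).
def Pre_search (candidate : String) (word_list : List String) : Prop :=
  word_list.Pairwise (fun a b => a.toList ≤ b.toList)
instance (candidate : String) (word_list : List String) : Decidable (Pre_search candidate word_list) := by unfold Pre_search; infer_instance

def pvWitness_search : String × List String := ("BE", ["ALPHA", "BETA", "GAMMA"])

def Spec_search (candidate : String) (word_list : List String) (out : String) : Prop := out = search_alt candidate word_list
instance (candidate : String) (word_list : List String) (out : String) : Decidable (Spec_search candidate word_list out) := by unfold Spec_search; infer_instance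

-- ===== CLAIM (what is proved, stated in full; the proofs are below) =====
def Claim_equal_search : Prop := ∀ (candidate : String) (word_list : List String), Dom_search candidate word_list → Pre_search candidate word_list → Spec_search candidate word_list (search candidate word_list)

-- ===== LEMMAS AND PROOFS =====

-- a prefix is lexicographically ≤ the whole word
lemma pv_prefix_not_lt (p : List Char) : ∀ (t : List Char), p <+: t → ¬ List.Lex (· < ·) t p := by
  induction p with
  | nil => intro t _ hlt; cases hlt
  | cons a p ih =>
    intro t h hlt
    obtain ⟨r, hr⟩ := h
    subst hr
    cases hlt with
    | rel hab => exact lt_irrefl _ hab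
    | cons htl => exact ih (p ++ r) (List.prefix_append p r) htl

-- if p < u ≤ v and p is a prefix of v then p is a prefix of u
lemma pv_prefix_between (p : List Char) : ∀ (u v : List Char), List.Lex (· < ·) p u →
    ¬ List.Lex (· < ·) v u → p <+: v → p <+: u := by
  induction p with
  | nil => intro u v _ _ _; exact List.nil_prefix
  | cons a p ih =>
    intro u v hpu huv hpv
    obtain ⟨r, hr⟩ := hpv
    subst hr
    cases u with
    | nil => cases hpu
    | cons b u =>
      cases hpu with
      | rel hab =>
        exact absurd (List.Lex.rel hab) huv
      | cons htl =>
        have huv' : ¬ List.Lex (· < ·) (p ++ r) u := fun hl => huv (List.Lex.cons hl)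
        exact List.cons_prefix_cons.mpr ⟨rfl, ih u (p ++ r) htl huv' (List.prefix_append p r)⟩
-- monotone indexing into a ≤-sorted list
lemma pv_mono (ws : List String) (hs : ws.Pairwise (· ≤ ·)) (i j : Nat) (hij : i ≤ j)
    (hj : j < ws.length) : ws[i]'(by omega) ≤ ws[j] := by
  rcases Nat.lt_or_eq_of_le hij with h | h
  · exact List.pairwise_iff_getElem.mp hs i j (by omega) hj h
  · subst h; exact le_refl _

lemma pv_startswith_iff (w c : String) :
    PySem.Str.startswith w c = true ↔ c.toList <+: w.toList := by
  simp [pysem, PySem.Chars.startswith_iff]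

lemma pv_loop_eq (c : String) (ws : List String) (hs : ws.Pairwise (· ≤ ·)) :
    ∀ (n : Nat) (low high : Int), (high + 1 - low).toNat = n → 0 ≤ low →
    high < (ws.length : Int) → low ≤ high + 1 →
    (∀ (i : Nat) (hi : i < ws.length), (i : Int) < low → ws[i] < c) →
    (∀ (i : Nat) (hi : i < ws.length), high < (i : Int) → c < ws[i]) →
    searchLoop c ws low high = search_alt c ws := by
  intro n
  induction n using Nat.strong_induction_on with
  | _ n IH =>
  intro low high hn h0 hh hlh hlo hhi
  rw [searchLoop]
  by_cases hle : low ≤ high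
  · simp only [hle, dif_pos]
    have hmid := PySem.Int.floordiv_two_mid_bounds hle
    set mid := PySem.Int.floordiv (low + high) 2 with hmdef
    have hm0 : 0 ≤ mid := le_trans h0 hmid.1
    have hmlen : mid < (ws.length : Int) := lt_of_le_of_lt hmid.2 (lt_of_le_of_lt (le_refl _) (by omega))
    have hmn : mid.toNat < ws.length := by omega
    have hget : PySem.List.pyGetD ws mid "" = ws[mid.toNat] :=
      PySem.List.pyGetD_eq_getElem ws "" hm0 hmlen
    rw [hget]
    by_cases heq : ws[mid.toNat] = c
    · simp only [heq]
      have hc : ws.contains c = true := by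
        rw [List.contains_iff_mem]
        exact heq ▸ List.getElem_mem hmn
      have halt : search_alt c ws = pvMATCH := by
        unfold search_alt; rw [hc]; rfl
      exact halt.symm
    · simp only [if_neg heq]
      by_cases hlt : ws[mid.toNat] < c
      · simp only [if_pos hlt]
        refine IH (high + 1 - (mid + 1)).toNat (by omega) (mid + 1) high rfl (by omega) hh (by omega) ?_ hhi
        intro i hi hilow
        rcases lt_or_ge (i : Int) low with h' | h'
        · exact hlo i hi h'
        · have : ws[i] ≤ ws[mid.toNat] := by
            have := pv_mono ws hs i mid.toNat (by omega) hmn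
            exact this
          exact lt_of_le_of_lt this hlt
      · simp only [if_neg hlt]
        have hcw : c < ws[mid.toNat] := lt_of_le_of_ne (not_lt.mp hlt) (Ne.symm heq)
        refine IH (mid - 1 + 1 - low).toNat (by omega) low (mid - 1) rfl h0 (by omega) (by omega) hlo ?_
        intro i hi hmi
        have : ws[mid.toNat] ≤ ws[i] := pv_mono ws hs mid.toNat i (by omega) hi
        exact lt_of_lt_of_le hcw this
  · simp only [hle, dite_false]
    have hlow : low = high + 1 := by omega
    -- c is not present in the list
    have hnomem : ¬ c ∈ ws := by
      intro hmem
      obtain ⟨j, hj, hjc⟩ := List.getElem_of_mem hmem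
      rcases lt_or_ge (j : Int) low with h' | h'
      · exact lt_irrefl c (hjc ▸ hlo j hj h')
      · exact lt_irrefl c (hjc ▸ hhi j hj (by omega))
    have hcontains : ws.contains c = false := by
      simp [hnomem]
    by_cases hA : low < (ws.length : Int) ∧
        PySem.Str.startswith (PySem.List.pyGetD ws low "") c = true
    · simp only [if_pos hA]
      obtain ⟨hlen, hsw⟩ := hA
      have hget : PySem.List.pyGetD ws low "" = ws[low.toNat]'(by omega) :=
        PySem.List.pyGetD_eq_getElem ws "" h0 hlen
      have hany : ws.any (fun w => PySem.Str.startswith w c) = true := by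
        rw [List.any_eq_true]
        exact ⟨ws[low.toNat]'(by omega), List.getElem_mem _, hget ▸ hsw⟩
      have halt : search_alt c ws = pvPREFIX := by
        unfold search_alt; rw [hcontains, hany]; rfl
      exact halt.symm
    · simp only [if_neg hA]
      have hany : ws.any (fun w => PySem.Str.startswith w c) = false := by
        rw [Bool.eq_false_iff]
        intro hanyt
        rw [List.any_eq_true] at hanyt
        obtain ⟨w, hwmem, hws⟩ := hanyt
        obtain ⟨j, hj, hjc⟩ := List.getElem_of_mem hwmem
        have hpre : c.toList <+: w.toList := (pv_startswith_iff w c).mp hws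
        have hclew : c ≤ w := by
          by_contra hgt
          rw [not_le] at hgt
          exact pv_prefix_not_lt c.toList w.toList hpre ((String.lt_iff_toList_lt).mp hgt)
        have hcw : c < w :=
          lt_of_le_of_ne hclew (fun h => hnomem (by rw [h]; exact hwmem))
        have hjlow : low ≤ (j : Int) := by
          by_contra h'
          exact absurd (hjc ▸ hlo j hj (by omega)) (not_lt.mpr (le_of_lt hcw))
        have hlen : low < (ws.length : Int) := by omega
        have hclo : c < ws[low.toNat]'(by omega) := hhi low.toNat (by omega) (by omega)
        have hlo_le : ws[low.toNat]'(by omega) ≤ w := hjc ▸ pv_mono ws hs low.toNat j (by omega) hj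
        have hprelo : c.toList <+: (ws[low.toNat]'(by omega) : String).toList := by
          refine pv_prefix_between c.toList _ w.toList
            ((String.lt_iff_toList_lt).mp hclo) ?_ hpre
          intro hl
          exact absurd ((String.lt_iff_toList_lt).mpr hl) (not_lt.mpr hlo_le)
        have hget : PySem.List.pyGetD ws low "" = ws[low.toNat]'(by omega) :=
          PySem.List.pyGetD_eq_getElem ws "" h0 hlen
        exact hA ⟨hlen, hget ▸ (pv_startswith_iff _ c).mpr hprelo⟩
      have halt : search_alt c ws = pvNOPE := by
        unfold search_alt; rw [hcontains, hany]; rfl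
      exact halt.symm

-- ===== VERDICT (by name: the statement is the Claim_ definition above) =====
theorem search_spec : Claim_equal_search := by
  intro candidate word_list _ hpre
  have hpre' : word_list.Pairwise (· ≤ ·) :=
    hpre.imp (fun h => String.le_iff_toList_le.mpr h)
  unfold Spec_search search
  refine (pv_loop_eq candidate word_list hpre' _ 0 ((word_list.length : Int) - 1) rfl (le_refl 0) (by omega) (by omega) ?_ ?_).symm ▸ rfl
  · intro i hi h'; omega
  · intro i hi h'; omega
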